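-- pv_equiv track=rewrite | github.com/basboot/advent_of_code | 2015/q11a.py | skip_illegal
-- ===== SOURCE A (Python) =====
-- illegal = [ord(x) - ord('a') for x in list("iol")]
--
-- def skip_illegal(n):
--     illegal_found = False
--     for i in range(len(n)):
--         if illegal_found:
--             n[i] = 0
--         else:
--             if n[i] in illegal:
--                 n[i] += 1
--                 illegal_found = True
--
--     return n
-- ===== SOURCE B (Python) =====
-- illegal = [ord(x) - ord('a') for x in list("iol")]
--
-- def skip_illegal(n):
--     # Divide and conquer: fix a segment n[lo:hi] in place, returning whether an
--     # illegal element was bumped somewhere in it.  If the left half already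
--     # contains one, the whole right half is zeroed wholesale; otherwise the
--     # right half is fixed recursively.
--     def fix(lo, hi):
--         if hi - lo == 0:
--             return False
--         if hi - lo == 1:
--             if n[lo] in illegal:
--                 n[lo] += 1
--                 return True
--             return False
--         mid = lo + (hi - lo) // 2
--         if fix(lo, mid):
--             n[mid:hi] = [0] * (hi - mid)
--             return True
--         return fix(mid, hi)
--
--     fix(0, len(n))
--     return n
-- ===== Notes on version B (the rewrite author's own statement) =====
-- stated objective: alternative
-- what changed: B replaces A's linear left-to-right state-machine loop (a flag carried across every index) by a divide-and-conquer recursion: fix the left half, and if it contained the first illegal element zero the entire right half in one bulk assignment, else recurse into the right half.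
import Mathlib
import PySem

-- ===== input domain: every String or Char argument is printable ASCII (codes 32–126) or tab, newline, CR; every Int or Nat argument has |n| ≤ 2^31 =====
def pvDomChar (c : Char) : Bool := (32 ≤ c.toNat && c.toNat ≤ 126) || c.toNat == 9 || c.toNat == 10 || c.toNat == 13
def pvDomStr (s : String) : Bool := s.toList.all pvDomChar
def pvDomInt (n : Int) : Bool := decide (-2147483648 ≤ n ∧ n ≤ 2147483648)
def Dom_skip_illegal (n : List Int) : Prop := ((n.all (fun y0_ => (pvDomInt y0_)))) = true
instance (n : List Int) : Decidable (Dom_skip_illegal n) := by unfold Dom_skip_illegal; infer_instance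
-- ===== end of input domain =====

-- B replaces A's flag-carrying linear loop by a divide-and-conquer recursion on halves;
-- both Pythons mutate their argument in place, the equivalence proved is about the return value.

-- ===== PORT A =====
-- illegal = [ord(x) - ord('a') for x in list("iol")] = [8, 14, 11]
def illegalA : List Int := [8, 14, 11]

-- A's for-i loop: each step reads/writes only n[i], so it is the state machine
-- carrying illegal_found over the elements in order
def skipA : Bool → List Int → List Int
  | _, [] => []
  | true, _ :: xs => 0 :: skipA true xs
  | false, x :: xs =>
      if x ∈ illegalA then (x + 1) :: skipA true xs else x :: skipA false xs

def skip_illegal (n : List Int) : List Int := skipA false n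

-- ===== PORT B =====
-- B's fix(lo, hi) works on the segment n[lo:hi] in place and reports whether it bumped
-- an illegal element; the list port carries the segment itself and returns the
-- transformed segment together with that flag.
def fixB : List Int → List Int × Bool
  | [] => ([], false)
  | [x] => if x ∈ illegalA then ([x + 1], true) else ([x], false)
  | x :: y :: rest =>
      let xs := x :: y :: rest
      let l := xs.take (xs.length / 2)
      let r := xs.drop (xs.length / 2)
      let pl := fixB l
      if pl.2 then (pl.1 ++ List.replicate r.length 0, true)
      else
        let pr := fixB r
        (pl.1 ++ pr.1, pr.2)
termination_by xs => xs.length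
decreasing_by
  · simp [List.length_take]; omega
  · simp [List.length_drop]; omega

def skip_illegal_alt (n : List Int) : List Int := (fixB n).1

-- ===== PRECONDITION & SPEC =====
def Spec_skip_illegal (n : List Int) (out : List Int) : Prop := out = skip_illegal_alt n
instance (n : List Int) (out : List Int) : Decidable (Spec_skip_illegal n out) := by unfold Spec_skip_illegal; infer_instance

-- ===== CLAIM (what is proved, stated in full; the proofs are below) =====
def Claim_equal_skip_illegal : Prop := ∀ (n : List Int), Dom_skip_illegal n → Spec_skip_illegal n (skip_illegal n)

-- ===== LEMMAS AND PROOFS =====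
theorem skipA_true (xs : List Int) : skipA true xs = List.replicate xs.length 0 := by
  induction xs with
  | nil => rfl
  | cons x xs ih => simp [skipA, ih, List.replicate]

theorem skipA_append (l r : List Int) :
    skipA false (l ++ r) =
      skipA false l ++ (if l.any (· ∈ illegalA) then List.replicate r.length 0 else skipA false r) := by
  induction l with
  | nil => simp [skipA]
  | cons x l ih =>
    by_cases hx : x ∈ illegalA
    · simp [skipA, hx, skipA_true]
    · simp [skipA, hx, ih]

theorem fixB_eq_aux : ∀ (k : Nat) (xs : List Int), xs.length ≤ k →
    fixB xs = (skipA false xs, xs.any (· ∈ illegalA)) := by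
  intro k
  induction k with
  | zero =>
    intro xs h
    have : xs = [] := List.eq_nil_of_length_eq_zero (Nat.le_zero.mp h)
    subst this
    simp [fixB, skipA]
  | succ k ih =>
    intro xs h
    match xs with
    | [] => simp [fixB, skipA]
    | [x] => by_cases hx : x ∈ illegalA <;> simp [fixB, skipA, hx]
    | x :: y :: rest =>
      have hl : (List.take ((x :: y :: rest).length / 2) (x :: y :: rest)).length ≤ k := by
        simp at h ⊢; omega
      have hr : (List.drop ((x :: y :: rest).length / 2) (x :: y :: rest)).length ≤ k := by
        simp at h ⊢; omega
      have hsplit : List.take ((x :: y :: rest).length / 2) (x :: y :: rest) ++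
          List.drop ((x :: y :: rest).length / 2) (x :: y :: rest) = x :: y :: rest :=
        List.take_append_drop _ _
      have hskip : skipA false (x :: y :: rest) =
          skipA false (List.take ((x :: y :: rest).length / 2) (x :: y :: rest)) ++
            (if (List.take ((x :: y :: rest).length / 2) (x :: y :: rest)).any (· ∈ illegalA) then
              List.replicate (List.drop ((x :: y :: rest).length / 2) (x :: y :: rest)).length 0
            else skipA false (List.drop ((x :: y :: rest).length / 2) (x :: y :: rest))) := by
        conv_lhs => rw [← hsplit]
        rw [skipA_append]
      have hany : (x :: y :: rest).any (· ∈ illegalA) =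
          ((List.take ((x :: y :: rest).length / 2) (x :: y :: rest)).any (· ∈ illegalA) ||
           (List.drop ((x :: y :: rest).length / 2) (x :: y :: rest)).any (· ∈ illegalA)) := by
        conv_lhs => rw [← hsplit]
        rw [List.any_append]
      rw [fixB, ih _ hl, ih _ hr, hskip, hany]
      by_cases hA : (List.take ((x :: y :: rest).length / 2) (x :: y :: rest)).any (· ∈ illegalA) = true
      · rw [hA]; simp
      · simp only [Bool.not_eq_true] at hA
        rw [hA]; simp

theorem fixB_eq (xs : List Int) : fixB xs = (skipA false xs, xs.any (· ∈ illegalA)) :=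
  fixB_eq_aux xs.length xs le_rfl

-- ===== VERDICT (by name: the statement is the Claim_ definition above) =====
theorem skip_illegal_spec : Claim_equal_skip_illegal := by
  intro n _
  unfold Spec_skip_illegal skip_illegal skip_illegal_alt
  rw [fixB_eq]
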